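-- pv_equiv track=rewrite | github.com/Try3D/aoc_2023 | day_10/part_2.py | check_enclosed
-- ===== SOURCE A (Python) =====
-- class Coordinates:
--     def __init__(self, x, y):
--         self.x = x
--         self.y = y
--
--     def __add__(self, other):
--         return Coordinates(self.x + other.x, self.y + other.y)
--
--     def __eq__(self, other):
--         return self.x == other.x and self.y == other.y
--
-- def check_enclosed(matrix, x, y):
--     path = [Coordinates(x, y)]
--     seen = [[0] * len(matrix[0]) for _ in range(len(matrix))]
--
--     while path:
--         z = path.pop()
--
--         if z.x < 0 or z.x > len(matrix[0]) - 1 or z.y < 0 or z.y > len(matrix) - 1: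
--             return False
--         if seen[z.y][z.x]:
--             continue
--         if matrix[z.y][z.x] == "#":
--             continue
--
--         seen[z.y][z.x] = 1
--
--         path.append(z + Coordinates(1, 0))
--         path.append(z + Coordinates(-1, 0))
--         path.append(z + Coordinates(0, 1))
--         path.append(z + Coordinates(0, -1))
--
--     return True
-- ===== SOURCE B (Python) =====
-- def check_enclosed(matrix, x, y):
--     h = len(matrix)
--     w = len(matrix[0])
--     if not (0 <= x < w and 0 <= y < h):
--         return False
--     if matrix[y][x] == "#":
--         return True
--     # Jacobi-style saturation: recompute, from the whole grid, the set of
--     # non-wall cells adjacent to (or already in) the current set, until fixpoint.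
--     reach = frozenset([(x, y)])
--     while True:
--         grown = frozenset(
--             (cx, cy)
--             for cy in range(h)
--             for cx in range(w)
--             if matrix[cy][cx] != "#"
--             and ((cx, cy) in reach
--                  or (cx + 1, cy) in reach or (cx - 1, cy) in reach
--                  or (cx, cy + 1) in reach or (cx, cy - 1) in reach)
--         )
--         if grown == reach:
--             break
--         reach = grown
--     return not any(cx == 0 or cx == w - 1 or cy == 0 or cy == h - 1
--                    for (cx, cy) in reach)
-- ===== Notes on version B (the rewrite author's own statement) =====
-- stated objective: alternative
-- what changed: A is a stack-based DFS that pushes even out-of-bounds neighbours, keeps a seen-matrix and early-returns False on popping an out-of-bounds cell; B has no stack and no visited structure at all: it computes the reachable region as the least fixpoint of a monotone 'grow' operator by repeated whole-grid Jacobi sweeps (recomputing from scratch the set of non-wall cells adjacent to or in the current set until it stops changing), then reports False iff some region cell lies on the grid border.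
-- outside the precondition, e.g. on check_enclosed([['.', '.'], ['.']], 0, 0): A returns False, B raises IndexError
import Mathlib
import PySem

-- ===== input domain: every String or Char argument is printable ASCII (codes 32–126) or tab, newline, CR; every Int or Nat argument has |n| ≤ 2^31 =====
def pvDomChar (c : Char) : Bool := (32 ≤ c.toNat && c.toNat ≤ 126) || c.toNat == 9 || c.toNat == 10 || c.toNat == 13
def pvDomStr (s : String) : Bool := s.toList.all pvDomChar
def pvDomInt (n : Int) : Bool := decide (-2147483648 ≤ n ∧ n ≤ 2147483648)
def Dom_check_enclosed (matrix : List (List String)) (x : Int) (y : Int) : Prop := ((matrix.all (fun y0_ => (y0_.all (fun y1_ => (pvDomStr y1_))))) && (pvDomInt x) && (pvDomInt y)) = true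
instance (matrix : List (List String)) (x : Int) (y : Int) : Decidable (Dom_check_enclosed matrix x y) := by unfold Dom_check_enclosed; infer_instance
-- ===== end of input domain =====

-- B replaces A's stack-based DFS (seen-matrix, early return on popping an out-of-bounds cell) by a
-- stack-free least-fixpoint computation: whole-grid saturation sweeps recompute the set of non-wall
-- cells adjacent to (or in) the current set until it stops changing, then the region is scanned for
-- a border cell; objective: alternative algorithm (A is O(w*h), B's sweeps are O((w*h)^2)).

-- ===== PORT A =====
-- matrix[cy][cx] / seen[cy][cx]: every use below is guarded so that 0 ≤ cy < len(matrix),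
-- 0 ≤ cx < len(matrix[0]); under Pre_ (rows at least as long as row 0) the getD defaults are
-- never read, so this is exact for Python's indexing there.
def ceCell (matrix : List (List String)) (cx cy : Int) : String :=
  (matrix.getD cy.toNat []).getD cx.toNat ""

def ceSeenGet (seen : List (List Int)) (cx cy : Int) : Int :=
  (seen.getD cy.toNat []).getD cx.toNat 0

def ceSeenSet (seen : List (List Int)) (cx cy : Int) : List (List Int) :=
  seen.modify cy.toNat (fun row => row.set cx.toNat 1)

-- A's while-loop; the Lean list is the Python stack with the head as its top (Python pops from
-- the end, so z+(0,-1), pushed last, is popped first).  `fuel` is a totality guard only: each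
-- iteration pops one element and at most `len(matrix)*len(matrix[0])` iterations push (4 each),
-- so `4*h*w + 1` iterations always drain the stack.
def ceLoopA (matrix : List (List String)) (w h : Nat) (fuel : Nat)
    (seen : List (List Int)) (path : List (Int × Int)) : Bool :=
  match fuel with
  | 0 => true
  | fuel + 1 =>
    match path with
    | [] => true
    | (zx, zy) :: rest =>
      if zx < 0 ∨ zx > (w : Int) - 1 ∨ zy < 0 ∨ zy > (h : Int) - 1 then false
      else if ceSeenGet seen zx zy ≠ 0 then ceLoopA matrix w h fuel seen rest
      else if ceCell matrix zx zy = "#" then ceLoopA matrix w h fuel seen rest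
      else ceLoopA matrix w h fuel (ceSeenSet seen zx zy)
        ((zx, zy - 1) :: (zx, zy + 1) :: (zx - 1, zy) :: (zx + 1, zy) :: rest)

def check_enclosed (matrix : List (List String)) (x : Int) (y : Int) : Bool :=
  ceLoopA matrix matrix.headI.length matrix.length
    (4 * matrix.length * matrix.headI.length + 1)
    (List.replicate matrix.length (List.replicate matrix.headI.length (0 : Int)))
    [(x, y)]

-- ===== PORT B =====
def ceInb (w h : Nat) (c : Int × Int) : Bool :=
  decide (0 ≤ c.1 ∧ c.1 < (w : Int) ∧ 0 ≤ c.2 ∧ c.2 < (h : Int))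

-- the grid cells in the comprehension's row-major order (cy outer, cx inner)
def gridCells (w h : Nat) : List (Int × Int) :=
  (List.range h).flatMap (fun (j : Nat) => (List.range w).map (fun (i : Nat) => ((i : Int), (j : Int))))

-- one Jacobi sweep: B's frozenset comprehension over the whole grid
def ceGrow (matrix : List (List String)) (w h : Nat)
    (reach : PySem.Set (Int × Int)) : PySem.Set (Int × Int) :=
  PySem.Set.ofList ((gridCells w h).filter (fun c =>
    decide (ceCell matrix c.1 c.2 ≠ "#") &&
      (PySem.Set.contains reach c ||
       PySem.Set.contains reach (c.1 + 1, c.2) || PySem.Set.contains reach (c.1 - 1, c.2) ||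
       PySem.Set.contains reach (c.1, c.2 + 1) || PySem.Set.contains reach (c.1, c.2 - 1))))

-- B's `while True` loop: sweep until the set stops changing.  `fuel` is a totality guard only:
-- each non-final sweep strictly enlarges a set of at most h*w grid cells, so h*w + 1 iterations
-- always reach the fixpoint.
def ceIter (matrix : List (List String)) (w h : Nat) :
    Nat → PySem.Set (Int × Int) → PySem.Set (Int × Int)
  | 0, reach => reach
  | fuel + 1, reach =>
    let grown := ceGrow matrix w h reach
    if PySem.Set.equal grown reach then reach else ceIter matrix w h fuel grown

def check_enclosed_alt (matrix : List (List String)) (x : Int) (y : Int) : Bool :=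
  let h := matrix.length
  let w := matrix.headI.length
  if !ceInb w h (x, y) then false
  else if ceCell matrix x y = "#" then true
  else
    let reach := ceIter matrix w h (h * w + 1) (PySem.Set.ofList [(x, y)])
    -- `any` over a Python set: the predicate makes the result order-independent
    !(reach.any (fun c =>
        decide (c.1 = 0 ∨ c.1 = (w : Int) - 1 ∨ c.2 = 0 ∨ c.2 = (h : Int) - 1)))

-- ===== PRECONDITION & SPEC =====
-- A raises IndexError on an empty matrix, and can raise IndexError when some row is shorter than
-- row 0 and the flood fill reaches such a row; when the start is out of bounds A returns False
-- before indexing any row, so those inputs are kept even for ragged matrices.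
def Pre_check_enclosed (matrix : List (List String)) (x : Int) (y : Int) : Prop :=
  matrix ≠ [] ∧
    ((∀ row ∈ matrix, matrix.headI.length ≤ row.length) ∨
      ¬ (0 ≤ x ∧ x < (matrix.headI.length : Int) ∧ 0 ≤ y ∧ y < (matrix.length : Int)))
instance (matrix : List (List String)) (x : Int) (y : Int) : Decidable (Pre_check_enclosed matrix x y) := by unfold Pre_check_enclosed; infer_instance

def pvWitness_check_enclosed : List (List String) × Int × Int := ([[".", "."], [".", "#"]], 0, 0)

def Spec_check_enclosed (matrix : List (List String)) (x : Int) (y : Int) (out : Bool) : Prop := out = check_enclosed_alt matrix x y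
instance (matrix : List (List String)) (x : Int) (y : Int) (out : Bool) : Decidable (Spec_check_enclosed matrix x y out) := by unfold Spec_check_enclosed; infer_instance

-- ===== CLAIM (what is proved, stated in full; the proofs are below) =====
def Claim_equal_check_enclosed : Prop := ∀ (matrix : List (List String)) (x : Int) (y : Int), Dom_check_enclosed matrix x y → Pre_check_enclosed matrix x y → Spec_check_enclosed matrix x y (check_enclosed matrix x y)

-- ===== LEMMAS AND PROOFS =====

-- In-bounds as a Prop, adjacency, and escape chains through unblocked floor cells.
def CeInbP (w h : Nat) (c : Int × Int) : Prop :=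
  0 ≤ c.1 ∧ c.1 < (w : Int) ∧ 0 ≤ c.2 ∧ c.2 < (h : Int)

def CeAdj (u v : Int × Int) : Prop :=
  v = (u.1 + 1, u.2) ∨ v = (u.1 - 1, u.2) ∨ v = (u.1, u.2 + 1) ∨ v = (u.1, u.2 - 1)

-- one flood-fill step out of `u`, avoiding the blocked set S
def CeStep (matrix : List (List String)) (w h : Nat) (S : Int × Int → Prop)
    (u v : Int × Int) : Prop :=
  CeInbP w h u ∧ ceCell matrix u.1 u.2 ≠ "#" ∧ ¬ S u ∧ CeAdj u v

def CeReach (matrix : List (List String)) (w h : Nat) (S : Int × Int → Prop)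
    (a b : Int × Int) : Prop :=
  Relation.ReflTransGen (CeStep matrix w h S) a b

def CeEsc (matrix : List (List String)) (w h : Nat) (S : Int × Int → Prop)
    (c : Int × Int) : Prop :=
  ∃ d, CeReach matrix w h S c d ∧ ¬ CeInbP w h d

theorem ceReach_mono {matrix : List (List String)} {w h : Nat} {S S' : Int × Int → Prop}
    (hss : ∀ u, S u → S' u) {a b : Int × Int}
    (hr : CeReach matrix w h S' a b) : CeReach matrix w h S a b :=
  Relation.ReflTransGen.mono (fun _ _ hst => ⟨hst.1, hst.2.1, fun hs => hst.2.2.1 (hss _ hs), hst.2.2.2⟩) hr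

theorem ceEsc_mono {matrix : List (List String)} {w h : Nat} {S S' : Int × Int → Prop}
    (hss : ∀ u, S u → S' u) {c : Int × Int}
    (he : CeEsc matrix w h S' c) : CeEsc matrix w h S c := by
  obtain ⟨d, hr, hd⟩ := he
  exact ⟨d, ceReach_mono hss hr, hd⟩

theorem ceEsc_congr {matrix : List (List String)} {w h : Nat} {S S' : Int × Int → Prop}
    (hss : ∀ u, S u ↔ S' u) {c : Int × Int} :
    CeEsc matrix w h S c ↔ CeEsc matrix w h S' c :=
  ⟨ceEsc_mono (fun u => (hss u).2), ceEsc_mono (fun u => (hss u).1)⟩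

-- splitting a chain at the (last) visit of z: either the chain never steps out of z,
-- or it ends with a z-free chain starting at a successor of z
theorem ceReach_split {matrix : List (List String)} {w h : Nat} {S : Int × Int → Prop}
    (z : Int × Int) {a c : Int × Int} (hr : CeReach matrix w h S a c) :
    CeReach matrix w h (fun u => S u ∨ u = z) a c ∨
      ∃ n, CeStep matrix w h S z n ∧ CeReach matrix w h (fun u => S u ∨ u = z) n c := by
  induction hr using Relation.ReflTransGen.head_induction_on with
  | refl => exact Or.inl Relation.ReflTransGen.refl
  | head hst htail ih =>
    rename_i a' b'
    rcases ih with ih | ih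
    · by_cases hz : a' = z
      · exact Or.inr ⟨b', hz ▸ hst, ih⟩
      · exact Or.inl (Relation.ReflTransGen.head ⟨hst.1, hst.2.1, fun hs => hs.elim hst.2.2.1 hz, hst.2.2.2⟩ ih)
    · exact Or.inr ih

theorem ceEsc_of_not_inb {matrix : List (List String)} {w h : Nat} {S : Int × Int → Prop}
    {c : Int × Int} (hc : ¬ CeInbP w h c) : CeEsc matrix w h S c :=
  ⟨c, Relation.ReflTransGen.refl, hc⟩

theorem not_ceEsc_of_S {matrix : List (List String)} {w h : Nat} {S : Int × Int → Prop}
    {z : Int × Int} (hin : CeInbP w h z) (hS : S z) : ¬ CeEsc matrix w h S z := by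
  rintro ⟨d, hr, hd⟩
  rcases hr.cases_head with rfl | ⟨n, hst, _⟩
  · exact hd hin
  · exact hst.2.2.1 hS

theorem not_ceEsc_of_wall {matrix : List (List String)} {w h : Nat} {S : Int × Int → Prop}
    {z : Int × Int} (hin : CeInbP w h z) (hw : ceCell matrix z.1 z.2 = "#") :
    ¬ CeEsc matrix w h S z := by
  rintro ⟨d, hr, hd⟩
  rcases hr.cases_head with rfl | ⟨n, hst, _⟩
  · exact hd hin
  · exact hst.2.1 hw

-- the four neighbours, in any order: membership is adjacency
theorem mem_nbrs_iff (z c : Int × Int) :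
    c ∈ [(z.1, z.2 - 1), (z.1, z.2 + 1), (z.1 - 1, z.2), (z.1 + 1, z.2)] ↔ CeAdj z c := by
  simp [CeAdj]; tauto

-- marking z: an escape from z is an escape (avoiding also z) from one of its neighbours
theorem ceEsc_step_iff {matrix : List (List String)} {w h : Nat} {S : Int × Int → Prop}
    {z : Int × Int} (hin : CeInbP w h z) (hnw : ceCell matrix z.1 z.2 ≠ "#") (hnS : ¬ S z) :
    CeEsc matrix w h S z ↔
      ∃ n, CeAdj z n ∧ CeEsc matrix w h (fun u => S u ∨ u = z) n := by
  constructor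
  · rintro ⟨d, hr, hd⟩
    rcases hr.cases_head with rfl | ⟨n, hst, htail⟩
    · exact absurd hin hd
    · rcases ceReach_split z htail with hsp | ⟨m, hstm, hsp⟩
      · exact ⟨n, hst.2.2.2, d, hsp, hd⟩
      · exact ⟨m, hstm.2.2.2, d, hsp, hd⟩
  · rintro ⟨n, hadj, d, hr, hd⟩
    exact ⟨d, Relation.ReflTransGen.head ⟨hin, hnw, hnS, hadj⟩ (ceReach_mono (fun u => Or.inl) hr), hd⟩

-- marking z: a chain from another stack cell either avoids z too, or passes through z
theorem ceEsc_update {matrix : List (List String)} {w h : Nat} {S : Int × Int → Prop}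
    (z : Int × Int) {c : Int × Int} (he : CeEsc matrix w h S c) :
    CeEsc matrix w h (fun u => S u ∨ u = z) c ∨ CeEsc matrix w h S z := by
  obtain ⟨d, hr, hd⟩ := he
  rcases ceReach_split z hr with hsp | ⟨m, hstm, hsp⟩
  · exact Or.inl ⟨d, hsp, hd⟩
  · exact Or.inr ⟨d, Relation.ReflTransGen.head hstm (ceReach_mono (fun u => Or.inl) hsp), hd⟩

-- ---- A-side: the seen matrix as a blocked set ----
def SeenShape (w h : Nat) (seen : List (List Int)) : Prop :=
  seen.length = h ∧ ∀ row ∈ seen, row.length = w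

def SofP (seen : List (List Int)) (c : Int × Int) : Prop :=
  0 ≤ c.1 ∧ 0 ≤ c.2 ∧ ceSeenGet seen c.1 c.2 ≠ 0

def zerosIn (seen : List (List Int)) : Nat :=
  (seen.map (fun row => row.countP (· == 0))).sum

theorem getD_modify (l : List (List Int)) (f : List Int → List Int) (n m : Nat) (hm : m < l.length) :
    (l.modify n f).getD m [] = if m = n then f (l.getD m []) else l.getD m [] := by
  rw [List.getD_eq_getElem l [] hm, List.getD_eq_getElem _ [] (by simpa using hm)]
  rw [List.getElem_modify]
  simp [eq_comm]

theorem getD_set (l : List Int) (n m : Nat) (hm : m < l.length) :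
    (l.set n 1).getD m 0 = if m = n then 1 else l.getD m 0 := by
  rw [List.getD_eq_getElem l 0 hm, List.getD_eq_getElem _ 0 (by simpa using hm)]
  rw [List.getElem_set]
  simp [eq_comm]

theorem getD_modify_oob (l : List (List Int)) (f : List Int → List Int) (n m : Nat) (hm : l.length ≤ m) :
    (l.modify n f).getD m [] = l.getD m [] := by
  rw [List.getD_eq_default, List.getD_eq_default] <;> simp [hm]

theorem row_len {w h : Nat} {seen : List (List Int)} (hsh : SeenShape w h seen)
    {m : Nat} (hm : m < seen.length) : (seen.getD m []).length = w := by
  rw [List.getD_eq_getElem seen [] hm]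
  exact hsh.2 _ (List.getElem_mem hm)

theorem seenGet_seenSet {w h : Nat} {seen : List (List Int)} (hsh : SeenShape w h seen)
    {zx zy : Int} (hin : CeInbP w h (zx, zy)) (a b : Int) (ha : 0 ≤ a) (hb : 0 ≤ b) :
    ceSeenGet (ceSeenSet seen zx zy) a b =
      if a = zx ∧ b = zy then 1 else ceSeenGet seen a b := by
  obtain ⟨hx0, hxw, hy0, hyh⟩ := hin
  obtain ⟨hlen, hrow⟩ := hsh
  simp only [ceSeenGet, ceSeenSet]
  by_cases hblt : b.toNat < seen.length
  · rw [getD_modify _ _ _ _ hblt]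
    by_cases hbe : b = zy
    · subst hbe
      have hrl : (seen.getD b.toNat []).length = w := row_len ⟨hlen, hrow⟩ hblt
      simp only [if_true, and_true]
      by_cases halt : a.toNat < (seen.getD b.toNat []).length
      · rw [getD_set _ _ _ halt]
        by_cases hae : a = zx
        · simp [hae]
        · rw [if_neg (by omega), if_neg hae]
      · rw [if_neg (show ¬ a = zx by omega), List.getD_eq_default, List.getD_eq_default] <;>
          simp_all
    · rw [if_neg (by omega), if_neg (by tauto)]
  · have : ¬ (a = zx ∧ b = zy) := by omega
    rw [getD_modify_oob _ _ _ _ (by omega), if_neg this]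

theorem sofP_seenSet {w h : Nat} {seen : List (List Int)} (hsh : SeenShape w h seen)
    {zx zy : Int} (hin : CeInbP w h (zx, zy)) (c : Int × Int) :
    SofP (ceSeenSet seen zx zy) c ↔ SofP seen c ∨ c = (zx, zy) := by
  obtain ⟨hx0, hxw, hy0, hyh⟩ := hin
  by_cases hc : 0 ≤ c.1 ∧ 0 ≤ c.2
  · have hg := seenGet_seenSet hsh ⟨hx0, hxw, hy0, hyh⟩ c.1 c.2 hc.1 hc.2
    simp only [SofP, hg]
    by_cases hce : c = (zx, zy)
    · subst hce
      refine ⟨fun _ => Or.inr rfl, fun _ => ⟨hc.1, hc.2, ?_⟩⟩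
      simp
    · have : ¬ (c.1 = zx ∧ c.2 = zy) := by
        intro hcc
        exact hce (Prod.ext_iff.2 ⟨hcc.1, hcc.2⟩)
      simp [this, hce]
  · have hne : c ≠ (zx, zy) := by
      intro hcc; subst hcc; exact hc ⟨hx0, hy0⟩
    simp only [SofP]
    constructor
    · rintro ⟨h1, h2, _⟩; exact absurd ⟨h1, h2⟩ hc
    · rintro (⟨h1, h2, _⟩ | hcc)
      · exact absurd ⟨h1, h2⟩ hc
      · exact absurd hcc hne

theorem seenShape_seenSet {w h : Nat} {seen : List (List Int)} (hsh : SeenShape w h seen)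
    (zx zy : Int) : SeenShape w h (ceSeenSet seen zx zy) := by
  obtain ⟨hlen, hrow⟩ := hsh
  refine ⟨by simpa [ceSeenSet] using hlen, ?_⟩
  intro row hr
  obtain ⟨i, hi, rfl⟩ := List.getElem_of_mem hr
  simp only [ceSeenSet] at hi ⊢
  rw [List.getElem_modify]
  have hi' : i < seen.length := by simpa [ceSeenSet] using hi
  split
  · simp [hrow _ (List.getElem_mem hi')]
  · exact hrow _ (List.getElem_mem hi')

theorem countP_set_zero (l : List Int) (n : Nat) (hn : n < l.length) (h0 : l.getD n 0 = 0) :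
    (l.set n 1).countP (· == 0) + 1 = l.countP (· == 0) := by
  induction l generalizing n with
  | nil => simp at hn
  | cons a t ih =>
    cases n with
    | zero =>
      have : a = 0 := by simpa using h0
      simp [this]
    | succ n =>
      have := ih n (by simpa using hn) (by simpa using h0)
      rw [List.set_cons_succ]
      simp only [List.countP_cons]
      omega

theorem zerosIn_modify_set (l : List (List Int)) (m k : Nat) (hm : m < l.length)
    (hk : k < (l.getD m []).length) (h0 : (l.getD m []).getD k 0 = 0) :
    zerosIn (l.modify m (fun row => row.set k 1)) + 1 = zerosIn l := by
  induction l generalizing m with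
  | nil => simp at hm
  | cons a t ih =>
    cases m with
    | zero =>
      have h0' : a.getD k 0 = 0 := by simpa using h0
      have hk' : k < a.length := by simpa using hk
      have hc := countP_set_zero a k hk' h0'
      rw [List.modify_zero_cons]
      simp only [zerosIn, List.map_cons, List.sum_cons]
      omega
    | succ m =>
      have := ih m (by simpa using hm) (by simpa using hk) (by simpa using h0)
      rw [List.modify_succ_cons]
      simp only [zerosIn, List.map_cons, List.sum_cons] at this ⊢
      omega

theorem zerosIn_seenSet {w h : Nat} {seen : List (List Int)} (hsh : SeenShape w h seen)
    {zx zy : Int} (hin : CeInbP w h (zx, zy)) (h0 : ceSeenGet seen zx zy = 0) :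
    zerosIn (ceSeenSet seen zx zy) + 1 = zerosIn seen := by
  obtain ⟨hx0, hxw, hy0, hyh⟩ := hin
  obtain ⟨hlen, hrow⟩ := hsh
  have hm : zy.toNat < seen.length := by omega
  have hk : zx.toNat < (seen.getD zy.toNat []).length := by
    rw [row_len ⟨hlen, hrow⟩ hm]; omega
  simpa [ceSeenSet] using zerosIn_modify_set seen zy.toNat zx.toNat hm hk h0

-- the combinatorial core of the marking step, at the level of the stack
theorem esc_mark_iff {matrix : List (List String)} {w h : Nat} {S : Int × Int → Prop}
    {zx zy : Int} (hin : CeInbP w h (zx, zy)) (hnw : ceCell matrix zx zy ≠ "#")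
    (hnS : ¬ S (zx, zy)) (rest : List (Int × Int)) :
    (∃ c ∈ (zx, zy - 1) :: (zx, zy + 1) :: (zx - 1, zy) :: (zx + 1, zy) :: rest,
        CeEsc matrix w h (fun u => S u ∨ u = (zx, zy)) c) ↔
      ∃ c ∈ (zx, zy) :: rest, CeEsc matrix w h S c := by
  constructor
  · rintro ⟨c, hc, he⟩
    rcases List.mem_cons.1 hc with rfl | hc'
    · exact ⟨(zx, zy), List.mem_cons_self,
        (ceEsc_step_iff hin hnw hnS).2 ⟨_, (mem_nbrs_iff (zx, zy) _).1 (by simp), he⟩⟩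
    rcases List.mem_cons.1 hc' with rfl | hc''
    · exact ⟨(zx, zy), List.mem_cons_self,
        (ceEsc_step_iff hin hnw hnS).2 ⟨_, (mem_nbrs_iff (zx, zy) _).1 (by simp), he⟩⟩
    rcases List.mem_cons.1 hc'' with rfl | hc3
    · exact ⟨(zx, zy), List.mem_cons_self,
        (ceEsc_step_iff hin hnw hnS).2 ⟨_, (mem_nbrs_iff (zx, zy) _).1 (by simp), he⟩⟩
    rcases List.mem_cons.1 hc3 with rfl | hc4
    · exact ⟨(zx, zy), List.mem_cons_self,
        (ceEsc_step_iff hin hnw hnS).2 ⟨_, (mem_nbrs_iff (zx, zy) _).1 (by simp), he⟩⟩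
    · exact ⟨c, List.mem_cons_of_mem _ hc4, ceEsc_mono (fun u => Or.inl) he⟩
  · rintro ⟨c, hc, he⟩
    rcases List.mem_cons.1 hc with rfl | hc'
    · obtain ⟨n, hadj, he'⟩ := (ceEsc_step_iff hin hnw hnS).1 he
      have hn := (mem_nbrs_iff (zx, zy) n).2 hadj
      simp only [List.mem_cons, List.not_mem_nil, or_false] at hn
      rcases hn with rfl | rfl | rfl | rfl <;> exact ⟨_, by simp, he'⟩
    · rcases ceEsc_update (zx, zy) he with he' | hez
      · exact ⟨c, by simp [hc'], he'⟩
      · obtain ⟨n, hadj, he'⟩ := (ceEsc_step_iff hin hnw hnS).1 hez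
        have hn := (mem_nbrs_iff (zx, zy) n).2 hadj
        simp only [List.mem_cons, List.not_mem_nil, or_false] at hn
        rcases hn with rfl | rfl | rfl | rfl <;> exact ⟨_, by simp, he'⟩

-- main loop invariant for A: the loop answers False iff some stacked cell escapes
theorem ceLoopA_spec (matrix : List (List String)) (w h : Nat) :
    ∀ (fuel : Nat) (seen : List (List Int)) (path : List (Int × Int)),
      SeenShape w h seen → 4 * zerosIn seen + path.length ≤ fuel →
      (ceLoopA matrix w h fuel seen path = false ↔
        ∃ c ∈ path, CeEsc matrix w h (SofP seen) c) := by
  intro fuel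
  induction fuel with
  | zero =>
    intro seen path hsh hb
    have : path = [] := List.length_eq_zero_iff.1 (by omega)
    subst this
    simp [ceLoopA]
  | succ fuel ih =>
    intro seen path hsh hb
    match path with
    | [] => simp [ceLoopA]
    | (zx, zy) :: rest =>
      show (if zx < 0 ∨ zx > (w : Int) - 1 ∨ zy < 0 ∨ zy > (h : Int) - 1 then false
        else if ceSeenGet seen zx zy ≠ 0 then ceLoopA matrix w h fuel seen rest
        else if ceCell matrix zx zy = "#" then ceLoopA matrix w h fuel seen rest
        else ceLoopA matrix w h fuel (ceSeenSet seen zx zy)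
          ((zx, zy - 1) :: (zx, zy + 1) :: (zx - 1, zy) :: (zx + 1, zy) :: rest)) = false ↔ _
      split_ifs with hoob hseen hwall
      · have hni : ¬ CeInbP w h (zx, zy) := by
          rintro ⟨h1, h2, h3, h4⟩; simp only at h1 h2 h3 h4; omega
        simpa using Or.inl (ceEsc_of_not_inb hni)
      · have hin : CeInbP w h (zx, zy) := by
          push Not at hoob; exact ⟨hoob.1, by omega, hoob.2.2.1, by omega⟩
        have hns := not_ceEsc_of_S (matrix := matrix) (S := SofP seen) hin ⟨hin.1, hin.2.2.1, hseen⟩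
        rw [ih seen rest hsh (by simp at hb ⊢; omega)]
        simp only [List.mem_cons, exists_eq_or_imp]
        tauto
      · have hin : CeInbP w h (zx, zy) := by
          push Not at hoob; exact ⟨hoob.1, by omega, hoob.2.2.1, by omega⟩
        have hns := not_ceEsc_of_wall (matrix := matrix) (S := SofP seen) hin hwall
        rw [ih seen rest hsh (by simp at hb ⊢; omega)]
        simp only [List.mem_cons, exists_eq_or_imp]
        tauto
      · have hin : CeInbP w h (zx, zy) := by
          push Not at hoob; exact ⟨hoob.1, by omega, hoob.2.2.1, by omega⟩
        push Not at hseen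
        have hz := zerosIn_seenSet hsh hin hseen
        rw [ih (ceSeenSet seen zx zy) _ (seenShape_seenSet hsh zx zy)
          (by simp at hb ⊢; omega)]
        have hcg : ∀ c, CeEsc matrix w h (SofP (ceSeenSet seen zx zy)) c ↔
            CeEsc matrix w h (fun u => SofP seen u ∨ u = (zx, zy)) c :=
          fun c => ceEsc_congr (fun u => sofP_seenSet hsh hin u)
        have hns : ¬ SofP seen (zx, zy) := fun hs => hs.2.2 hseen
        rw [show (∃ c ∈ (zx, zy - 1) :: (zx, zy + 1) :: (zx - 1, zy) :: (zx + 1, zy) :: rest,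
              CeEsc matrix w h (SofP (ceSeenSet seen zx zy)) c) ↔
            (∃ c ∈ (zx, zy - 1) :: (zx, zy + 1) :: (zx - 1, zy) :: (zx + 1, zy) :: rest,
              CeEsc matrix w h (fun u => SofP seen u ∨ u = (zx, zy)) c) from
          by constructor <;> rintro ⟨c, hc, he⟩
             · exact ⟨c, hc, (hcg c).mp he⟩
             · exact ⟨c, hc, (hcg c).mpr he⟩ ]
        exact esc_mark_iff hin hwall hns rest

-- ---- B-side: the saturation sweeps ----
theorem length_gridCells (w h : Nat) : (gridCells w h).length = h * w := by
  simp [gridCells, List.length_flatMap]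

theorem mem_gridCells_iff (w h : Nat) (c : Int × Int) :
    c ∈ gridCells w h ↔ CeInbP w h c := by
  obtain ⟨a, b⟩ := c
  unfold gridCells CeInbP
  constructor
  · intro hmem
    obtain ⟨j, hj, hc⟩ := List.mem_flatMap.1 hmem
    obtain ⟨i, hi, heq⟩ := List.mem_map.1 hc
    rw [List.mem_range] at hj hi
    obtain ⟨rfl, rfl⟩ := Prod.mk.injEq .. ▸ heq
    exact ⟨Int.natCast_nonneg i, by simp; omega, Int.natCast_nonneg j, by simp; omega⟩
  · rintro ⟨h1, h2, h3, h4⟩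
    simp only at h1 h2 h3 h4
    refine List.mem_flatMap.2 ⟨b.toNat, List.mem_range.2 (by omega),
      List.mem_map.2 ⟨a.toNat, List.mem_range.2 (by omega), ?_⟩⟩
    simp only [Prod.mk.injEq]
    omega

theorem mem_grow_iff (matrix : List (List String)) (w h : Nat)
    (reach : PySem.Set (Int × Int)) (c : Int × Int) :
    c ∈ ceGrow matrix w h reach ↔
      CeInbP w h c ∧ ceCell matrix c.1 c.2 ≠ "#" ∧
        (c ∈ reach ∨ (c.1 + 1, c.2) ∈ reach ∨ (c.1 - 1, c.2) ∈ reach ∨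
          (c.1, c.2 + 1) ∈ reach ∨ (c.1, c.2 - 1) ∈ reach) := by
  simp only [ceGrow, PySem.Set.mem_ofList, List.mem_filter, mem_gridCells_iff,
    Bool.and_eq_true, Bool.or_eq_true, decide_eq_true_eq, PySem.Set.contains_iff]
  tauto

-- every cell collected by the sweeps is an in-bounds, non-wall cell reachable from the start
def CeGood (matrix : List (List String)) (w h : Nat) (st : Int × Int)
    (reach : PySem.Set (Int × Int)) : Prop :=
  ∀ c ∈ reach, CeInbP w h c ∧ ceCell matrix c.1 c.2 ≠ "#" ∧
    CeReach matrix w h (fun _ => False) st c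

theorem grow_good {matrix : List (List String)} {w h : Nat} {st : Int × Int}
    {reach : PySem.Set (Int × Int)} (hg : CeGood matrix w h st reach) :
    CeGood matrix w h st (ceGrow matrix w h reach) := by
  intro c hc
  rw [mem_grow_iff] at hc
  obtain ⟨hin, hnw, hnb⟩ := hc
  refine ⟨hin, hnw, ?_⟩
  rcases hnb with hm | hm | hm | hm | hm
  · exact (hg c hm).2.2
  all_goals {
    obtain ⟨hinu, hnwu, hru⟩ := hg _ hm
    refine Relation.ReflTransGen.tail hru ⟨hinu, hnwu, not_false, ?_⟩
    simp [CeAdj, Prod.ext_iff] }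

theorem subset_grow {matrix : List (List String)} {w h : Nat} {st : Int × Int}
    {reach : PySem.Set (Int × Int)} (hg : CeGood matrix w h st reach) :
    reach ⊆ ceGrow matrix w h reach := by
  intro c hc
  obtain ⟨hin, hnw, -⟩ := hg c hc
  exact (mem_grow_iff matrix w h reach c).2 ⟨hin, hnw, Or.inl hc⟩

theorem good_le_card {matrix : List (List String)} {w h : Nat} {st : Int × Int}
    {reach : PySem.Set (Int × Int)} (hg : CeGood matrix w h st reach)
    (hnd : reach.Nodup) : reach.length ≤ h * w := by
  have hsub : reach ⊆ gridCells w h := fun c hc =>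
    (mem_gridCells_iff w h c).2 (hg c hc).1
  have := (List.subperm_of_subset hnd hsub).length_le
  rwa [length_gridCells] at this

-- with enough fuel the iteration reaches a set closed under the sweep
theorem ceIter_spec (matrix : List (List String)) (w h : Nat) (st : Int × Int) :
    ∀ (fuel : Nat) (reach : PySem.Set (Int × Int)),
      CeGood matrix w h st reach → reach.Nodup → h * w + 1 ≤ reach.length + fuel →
      CeGood matrix w h st (ceIter matrix w h fuel reach) ∧
        reach ⊆ ceIter matrix w h fuel reach ∧
        ∀ c, c ∈ ceGrow matrix w h (ceIter matrix w h fuel reach) →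
          c ∈ ceIter matrix w h fuel reach := by
  intro fuel
  induction fuel with
  | zero =>
    intro reach hg hnd hb
    have := good_le_card hg hnd
    omega
  | succ fuel ih =>
    intro reach hg hnd hb
    rw [show ceIter matrix w h (fuel + 1) reach =
        (if PySem.Set.equal (ceGrow matrix w h reach) reach then reach
         else ceIter matrix w h fuel (ceGrow matrix w h reach)) from rfl]
    split_ifs with heq
    · refine ⟨hg, fun c hc => hc, fun c hc => ?_⟩
      exact (PySem.Set.equal_iff _ _ |>.1 heq c).1 hc
    · have hsub : reach ⊆ ceGrow matrix w h reach := subset_grow hg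
      have hex : ∃ z, z ∈ ceGrow matrix w h reach ∧ z ∉ reach := by
        by_contra hno
        push Not at hno
        exact heq ((PySem.Set.equal_iff _ _).2 (fun z => ⟨fun hz => hno z hz, fun hz => hsub hz⟩))
      obtain ⟨z, hz1, hz2⟩ := hex
      have hndg : (ceGrow matrix w h reach).Nodup := PySem.Set.nodup_ofList _
      have hlen : reach.length + 1 ≤ (ceGrow matrix w h reach).length := by
        have hsub' : z :: reach ⊆ ceGrow matrix w h reach := by
          intro u hu
          rcases List.mem_cons.1 hu with rfl | hu
          · exact hz1
          · exact hsub hu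
        have := (List.subperm_of_subset (List.nodup_cons.2 ⟨hz2, hnd⟩) hsub').length_le
        simpa using this
      obtain ⟨hg', hsub', hcl⟩ := ih (ceGrow matrix w h reach) (grow_good hg) hndg (by omega)
      exact ⟨hg', fun c hc => hsub' (hsub hc), hcl⟩

-- a sweep-closed set containing the start absorbs every reachable in-bounds non-wall cell
theorem closed_complete {matrix : List (List String)} {w h : Nat} {st : Int × Int}
    {R : PySem.Set (Int × Int)}
    (hcl : ∀ c, c ∈ ceGrow matrix w h R → c ∈ R) (hst : st ∈ R) :
    ∀ c, CeReach matrix w h (fun _ => False) st c →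
      CeInbP w h c → ceCell matrix c.1 c.2 ≠ "#" → c ∈ R := by
  intro c hr
  induction hr with
  | refl => intro _ _; exact hst
  | tail hr hstp ih =>
    rename_i u c
    intro hin hnw
    obtain ⟨hinu, hnwu, -, hadj⟩ := hstp
    have hu : u ∈ R := ih hinu hnwu
    refine hcl c ((mem_grow_iff matrix w h R c).2 ⟨hin, hnw, ?_⟩)
    rcases hadj with h' | h' | h' | h'
    · subst h'
      refine Or.inr (Or.inr (Or.inl ?_))
      simpa using hu
    · subst h'
      refine Or.inr (Or.inl ?_)
      simpa using hu
    · subst h'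
      refine Or.inr (Or.inr (Or.inr (Or.inr ?_)))
      simpa using hu
    · subst h'
      refine Or.inr (Or.inr (Or.inr (Or.inl ?_)))
      simpa using hu

-- ---- bridge: escaping = some region cell on the border ----
theorem ceEsc_iff_border (matrix : List (List String)) (w h : Nat) {st : Int × Int}
    (hst : CeInbP w h st) :
    CeEsc matrix w h (fun _ => False) st ↔
      ∃ c, (CeInbP w h c ∧ ceCell matrix c.1 c.2 ≠ "#" ∧
              CeReach matrix w h (fun _ => False) st c) ∧
        (c.1 = 0 ∨ c.1 = (w : Int) - 1 ∨ c.2 = 0 ∨ c.2 = (h : Int) - 1) := by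
  constructor
  · rintro ⟨d, hr, hd⟩
    rcases Relation.ReflTransGen.cases_tail hr with rfl | ⟨u, hru, hstp⟩
    · exact absurd hst hd
    · obtain ⟨hinu, hnwu, -, hadj⟩ := hstp
      refine ⟨u, ⟨hinu, hnwu, hru⟩, ?_⟩
      obtain ⟨hu1, hu2, hu3, hu4⟩ := hinu
      rcases hadj with rfl | rfl | rfl | rfl <;> simp only [CeInbP] at hd <;> omega
  · rintro ⟨c, ⟨hinc, hnwc, hr⟩, hb⟩
    obtain ⟨hc1, hc2, hc3, hc4⟩ := hinc
    rcases hb with hb | hb | hb | hb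
    · refine ⟨(c.1 - 1, c.2), Relation.ReflTransGen.tail hr
        ⟨⟨hc1, hc2, hc3, hc4⟩, hnwc, not_false, Or.inr (Or.inl rfl)⟩, ?_⟩
      simp only [CeInbP]; omega
    · refine ⟨(c.1 + 1, c.2), Relation.ReflTransGen.tail hr
        ⟨⟨hc1, hc2, hc3, hc4⟩, hnwc, not_false, Or.inl rfl⟩, ?_⟩
      simp only [CeInbP]; omega
    · refine ⟨(c.1, c.2 - 1), Relation.ReflTransGen.tail hr
        ⟨⟨hc1, hc2, hc3, hc4⟩, hnwc, not_false, Or.inr (Or.inr (Or.inr rfl))⟩, ?_⟩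
      simp only [CeInbP]; omega
    · refine ⟨(c.1, c.2 + 1), Relation.ReflTransGen.tail hr
        ⟨⟨hc1, hc2, hc3, hc4⟩, hnwc, not_false, Or.inr (Or.inr (Or.inl rfl))⟩, ?_⟩
      simp only [CeInbP]; omega

-- one-step unfolding equation for A's loop
theorem ceLoopA_cons (matrix : List (List String)) (w h fuel : Nat)
    (seen : List (List Int)) (zx zy : Int) (rest : List (Int × Int)) :
    ceLoopA matrix w h (fuel + 1) seen ((zx, zy) :: rest) =
      if zx < 0 ∨ zx > (w : Int) - 1 ∨ zy < 0 ∨ zy > (h : Int) - 1 then false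
      else if ceSeenGet seen zx zy ≠ 0 then ceLoopA matrix w h fuel seen rest
      else if ceCell matrix zx zy = "#" then ceLoopA matrix w h fuel seen rest
      else ceLoopA matrix w h fuel (ceSeenSet seen zx zy)
        ((zx, zy - 1) :: (zx, zy + 1) :: (zx - 1, zy) :: (zx + 1, zy) :: rest) := rfl

theorem not_bang_eq_false (b : Bool) : ((!b) = false) ↔ b = true := by cases b <;> simp

theorem seenShape_init (w h : Nat) :
    SeenShape w h (List.replicate h (List.replicate w (0 : Int))) := by
  refine ⟨by simp, ?_⟩
  intro row hr
  rw [List.eq_of_mem_replicate hr]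
  simp

theorem zerosIn_init (w h : Nat) :
    zerosIn (List.replicate h (List.replicate w (0 : Int))) = h * w := by
  simp [zerosIn, List.map_replicate, List.countP_replicate, List.sum_replicate]

theorem ceSeenGet_init (w h : Nat) (a b : Int) :
    ceSeenGet (List.replicate h (List.replicate w (0 : Int))) a b = 0 := by
  unfold ceSeenGet
  simp only [List.getD, List.getElem?_replicate]
  split_ifs with h1
  · simp [List.getElem?_replicate]
    split_ifs <;> simp
  · simp

-- A's loop on the initial state answers False iff the start escapes
theorem checkA_iff_esc (matrix : List (List String)) (x y : Int) :
    check_enclosed matrix x y = false ↔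
      CeEsc matrix matrix.headI.length matrix.length (fun _ => False) (x, y) := by
  have hS0 : ∀ u, SofP (List.replicate matrix.length
      (List.replicate matrix.headI.length (0 : Int))) u ↔ False :=
    fun u => ⟨fun hu => hu.2.2 (ceSeenGet_init _ _ _ _), False.elim⟩
  rw [check_enclosed,
    ceLoopA_spec matrix matrix.headI.length matrix.length
      (4 * matrix.length * matrix.headI.length + 1)
      (List.replicate matrix.length (List.replicate matrix.headI.length (0 : Int)))
      [(x, y)] (seenShape_init _ _)
      (by rw [zerosIn_init]; simp [Nat.mul_assoc])]
  constructor
  · rintro ⟨c, hc, he⟩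
    rcases List.mem_singleton.1 hc with rfl
    exact (ceEsc_congr hS0).1 he
  · intro he
    exact ⟨(x, y), List.mem_singleton.2 rfl, (ceEsc_congr hS0).2 he⟩

-- ===== VERDICT (by name: the statement is the Claim_ definition above) =====
theorem check_enclosed_spec : Claim_equal_check_enclosed := by
  intro matrix x y _ _
  unfold Spec_check_enclosed
  by_cases hin : CeInbP matrix.headI.length matrix.length (x, y)
  · have hci : ceInb matrix.headI.length matrix.length (x, y) = true := by
      simp only [ceInb, decide_eq_true_eq]; exact hin
    by_cases hwall : ceCell matrix x y = "#"
    · -- start on a wall: A's stack empties at once, B's wall branch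
      have hA : check_enclosed matrix x y = true := by
        cases hA' : check_enclosed matrix x y
        · exact absurd ((checkA_iff_esc matrix x y).1 hA')
            (not_ceEsc_of_wall hin hwall)
        · rfl
      rw [hA, check_enclosed_alt]
      simp [hci, hwall]
    · -- start on open floor: both sides are the escape predicate
      obtain ⟨hg, hsub, hcl⟩ := ceIter_spec matrix matrix.headI.length matrix.length (x, y)
        (matrix.length * matrix.headI.length + 1) (PySem.Set.ofList [(x, y)])
        (by
          intro c hc
          rcases List.mem_singleton.1 ((PySem.Set.mem_ofList _ _).1 hc) with rfl
          exact ⟨hin, hwall, Relation.ReflTransGen.refl⟩)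
        (PySem.Set.nodup_ofList _)
        (by simp [PySem.Set.ofList, PySem.Set.add, PySem.Set.empty])
      have hstR : (x, y) ∈ ceIter matrix matrix.headI.length matrix.length
          (matrix.length * matrix.headI.length + 1) (PySem.Set.ofList [(x, y)]) :=
        hsub ((PySem.Set.mem_ofList _ _).2 (List.mem_singleton.2 rfl))
      have hmemR : ∀ c, c ∈ ceIter matrix matrix.headI.length matrix.length
            (matrix.length * matrix.headI.length + 1) (PySem.Set.ofList [(x, y)]) ↔
          (CeInbP matrix.headI.length matrix.length c ∧ ceCell matrix c.1 c.2 ≠ "#" ∧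
            CeReach matrix matrix.headI.length matrix.length (fun _ => False) (x, y) c) := by
        intro c
        constructor
        · intro hc; exact hg c hc
        · rintro ⟨h1, h2, h3⟩; exact closed_complete hcl hstR c h3 h1 h2
      have hB' : check_enclosed_alt matrix x y = false ↔
          ∃ c, (CeInbP matrix.headI.length matrix.length c ∧ ceCell matrix c.1 c.2 ≠ "#" ∧
              CeReach matrix matrix.headI.length matrix.length (fun _ => False) (x, y) c) ∧
            (c.1 = 0 ∨ c.1 = (matrix.headI.length : Int) - 1 ∨
              c.2 = 0 ∨ c.2 = (matrix.length : Int) - 1) := by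
        rw [check_enclosed_alt]
        simp only [hci, Bool.not_true, if_false, Bool.false_eq_true, if_neg hwall]
        rw [not_bang_eq_false, List.any_eq_true]
        constructor
        · rintro ⟨c, hc, hp⟩
          exact ⟨c, (hmemR c).1 hc, by simpa using hp⟩
        · rintro ⟨c, hc, hb⟩
          exact ⟨c, (hmemR c).2 hc, by simpa using hb⟩
      have hAB : check_enclosed matrix x y = false ↔ check_enclosed_alt matrix x y = false := by
        rw [checkA_iff_esc, hB', ceEsc_iff_border matrix matrix.headI.length matrix.length hin]
      cases h1 : check_enclosed matrix x y <;> cases h2 : check_enclosed_alt matrix x y <;>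
        simp_all
  · -- start out of bounds: A pops it at once, B rejects it up front
    have hA : check_enclosed matrix x y = false := by
      rw [check_enclosed, ceLoopA_cons, if_pos]
      simp only [CeInbP] at hin
      omega
    have hB : check_enclosed_alt matrix x y = false := by
      have hci : ceInb matrix.headI.length matrix.length (x, y) = false := by
        simp only [ceInb, decide_eq_false_iff_not]
        exact hin
      rw [check_enclosed_alt]
      simp [hci]
    rw [hA, hB]
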